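-- pv_equiv track=rewrite | github.com/KEGAVICIO/Problemas | Semana_1/MatrixElementSum/MatrixElemtSum_KEGA.py | solution
-- ===== SOURCE A (Python) =====
-- def solution(matrix):
--     suma = 0
--     if len(matrix) > 1:
--         for f in range(1, len(matrix)):
--             for i in range(len(matrix[f])):
--                 if matrix[f-1][i] == 0:
--                     matrix[f][i] = 0
--
--     for f in matrix:
--         for i in f:
--             suma += i
--
--     return suma
-- ===== SOURCE B (Python) =====
-- # Column-major single pass: per-column zero_seen flag fuses propagation and summation;
-- # mutates matrix in place like A (sets entries below a zero to 0).
-- def solution(matrix):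
--     total = 0
--     width = max((len(row) for row in matrix), default=0)
--     for j in range(width):
--         zero_seen = False
--         for row in matrix:
--             if j < len(row):
--                 if zero_seen:
--                     row[j] = 0
--                 else:
--                     total += row[j]
--                     if row[j] == 0:
--                         zero_seen = True
--     return total
-- ===== Notes on version B (the rewrite author's own statement) =====
-- stated objective: simpler
-- what changed: Replaces A's two separate row-major passes (a propagation pass re-reading the previous row, then a full summation pass) with a single column-major pass keeping one per-column zero_seen flag that fuses propagation and summation.
import Mathlib
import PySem

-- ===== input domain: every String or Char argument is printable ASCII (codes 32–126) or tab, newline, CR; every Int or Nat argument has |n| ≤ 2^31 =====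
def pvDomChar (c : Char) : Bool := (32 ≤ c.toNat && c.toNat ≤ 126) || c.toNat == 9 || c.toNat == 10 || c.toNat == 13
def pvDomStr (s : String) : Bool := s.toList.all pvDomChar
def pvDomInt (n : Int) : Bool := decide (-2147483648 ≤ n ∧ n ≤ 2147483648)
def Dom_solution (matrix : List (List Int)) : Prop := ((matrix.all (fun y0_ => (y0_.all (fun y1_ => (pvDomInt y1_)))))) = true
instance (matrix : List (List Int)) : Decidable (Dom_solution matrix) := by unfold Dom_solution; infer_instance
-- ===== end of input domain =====

-- B replaces A's two row-major passes (zero propagation, then summation) by one fused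
-- column-major pass with a per-column zero_seen flag (objective: simpler).
-- Both A and B mutate `matrix` in place in Python; the equivalence proved here is about
-- the return value only (on Pre_ the mutations happen to coincide as well, untested here).

-- ===== PORT A =====
-- inner loop `for i in range(len(matrix[f])): if matrix[f-1][i] == 0: matrix[f][i] = 0`
-- (prev.getD i 0: under Pre_ every read index is in range, as in the Python)
def pvInnerA (prev row : List Int) : List Int :=
  (List.range row.length).foldl (fun r i => if prev.getD i 0 = 0 then r.set i 0 else r) row

-- the propagation pass `for f in range(1, len(matrix)): ...` on the matrix state
def pvPropA (m : List (List Int)) : List (List Int) :=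
  if m.length > 1 then
    (List.range' 1 (m.length - 1)).foldl
      (fun mat f => mat.set f (pvInnerA (mat.getD (f - 1) []) (mat.getD f []))) m
  else m

def solution (matrix : List (List Int)) : Int :=
  (pvPropA matrix).foldl (fun s r => r.foldl (fun s x => s + x) s) 0

-- ===== PORT B =====
-- one row step of Source B's inner loop (state = (total, zero_seen)); the in-place write
-- `row[j] = 0` when zero_seen does not affect the returned total and is not modelled
def pvStepB (j : Nat) (st : Int × Bool) (row : List Int) : Int × Bool :=
  if j < row.length then
    if st.2 then st
    else (st.1 + row.getD j 0, row.getD j 0 == 0)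
  else st

def solution_alt (matrix : List (List Int)) : Int :=
  let width := matrix.foldl (fun w r => max w r.length) 0
  (List.range width).foldl (fun total j => (matrix.foldl (pvStepB j) (total, false)).1) 0

-- ===== PRECONDITION & SPEC =====
-- Pre_ excludes exactly the jagged matrices in which some row is longer than the row
-- above it: there the Python A raises IndexError on matrix[f-1][i] (B returns a value there).
def Pre_solution (matrix : List (List Int)) : Prop :=
  ∀ f < matrix.length - 1, (matrix.getD (f + 1) []).length ≤ (matrix.getD f []).length
instance (matrix : List (List Int)) : Decidable (Pre_solution matrix) := by
  unfold Pre_solution; infer_instance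

def pvWitness_solution : List (List Int) := [[1, 2], [0, 3], [4, 5]]

def Spec_solution (matrix : List (List Int)) (out : Int) : Prop := out = solution_alt matrix
instance (matrix : List (List Int)) (out : Int) : Decidable (Spec_solution matrix out) := by
  unfold Spec_solution; infer_instance

-- ===== CLAIM (what is proved, stated in full; the proofs are below) =====
def Claim_equal_solution : Prop :=
  ∀ (matrix : List (List Int)), Dom_solution matrix → Pre_solution matrix →
    Spec_solution matrix (solution matrix)

-- ===== LEMMAS AND PROOFS =====

-- abbreviations over the ORIGINAL matrix
def pvA (m : List (List Int)) (f i : Nat) : Int := (m.getD f []).getD i 0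
def pvLen (m : List (List Int)) (f : Nat) : Nat := (m.getD f []).length
-- "some row strictly above f has a zero in column i (within its length)"
def pvDead (m : List (List Int)) (f i : Nat) : Bool :=
  (List.range f).any (fun g => decide (i < pvLen m g) && decide (pvA m g i = 0))
-- the final (post-propagation) value of cell (f, i), as a total function
def pvT (m : List (List Int)) (f i : Nat) : Int := if pvDead m f i then 0 else pvA m f i
-- the final row f as a list
def pvFr (m : List (List Int)) (f : Nat) : List Int :=
  (List.range (pvLen m f)).map (fun i => pvT m f i)
def pvWidth (m : List (List Int)) : Nat := m.foldl (fun w r => max w r.length) 0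

-- generic small lemmas ------------------------------------------------------

lemma pv_map_range_getD {α : Type} (l : List α) (d : α) :
    (List.range l.length).map (fun i => l.getD i d) = l := by
  apply List.ext_getElem
  · simp
  · intro i h1 h2
    simp [List.getD_eq_getElem?_getD, List.getElem?_eq_getElem h2]

lemma pv_foldl_add (r : List Int) (s : Int) :
    r.foldl (fun a x => a + x) s = s + r.sum := by
  induction r generalizing s with
  | nil => simp
  | cons x xs ih => simp [List.foldl_cons, ih, List.sum_cons]; ring

lemma pv_sum_map_range (g : Nat → Int) (L : Nat) :
    ((List.range L).map g).sum = ∑ i ∈ Finset.range L, g i := by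
  induction L with
  | zero => simp
  | succ n ih => simp [List.range_succ, Finset.sum_range_succ, ih]

lemma pv_list_sum_eq (r : List Int) :
    r.sum = ∑ i ∈ Finset.range r.length, r.getD i 0 := by
  conv_lhs => rw [← pv_map_range_getD r 0]
  rw [pv_sum_map_range]

lemma pv_foldl_range_add (g : Nat → Int) (w : Nat) (c : Int) :
    (List.range w).foldl (fun t j => t + g j) c = c + ∑ j ∈ Finset.range w, g j := by
  induction w generalizing c with
  | zero => simp
  | succ n ih => simp [List.range_succ, List.foldl_append, ih, Finset.sum_range_succ]; ring

lemma pv_foldl_max_mono (l : List (List Int)) (c c' : Nat) (h : c ≤ c') :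
    l.foldl (fun w r => max w r.length) c ≤ l.foldl (fun w r => max w r.length) c' := by
  induction l generalizing c c' with
  | nil => simpa using h
  | cons y ys ih => exact ih _ _ (by simp; omega)

lemma pv_foldl_max_init (l : List (List Int)) (c : Nat) :
    c ≤ l.foldl (fun w r => max w r.length) c := by
  induction l generalizing c with
  | nil => simp
  | cons y ys ih => exact le_trans (le_max_left c y.length) (ih _)

lemma pv_width_le (m : List (List Int)) (r : List Int) (hr : r ∈ m) :
    r.length ≤ pvWidth m := by
  unfold pvWidth
  induction m with
  | nil => simp at hr
  | cons x xs ih =>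
    rw [List.foldl_cons]
    rcases List.mem_cons.mp hr with h | h
    · subst h
      exact le_trans (le_max_right 0 r.length) (pv_foldl_max_init xs _)
    · exact le_trans (ih h) (pv_foldl_max_mono xs 0 _ (Nat.zero_le _))

lemma pv_len_le_width (m : List (List Int)) (f : Nat) (hf : f < m.length) :
    pvLen m f ≤ pvWidth m := by
  have : m.getD f [] = m[f] := List.getD_eq_getElem m [] hf
  unfold pvLen
  rw [this]
  exact pv_width_le m _ (List.getElem_mem hf)

-- shift lemmas for pvA / pvDead / pvT --------------------------------------

lemma pv_a_succ (r : List Int) (rs : List (List Int)) (g i : Nat) :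
    pvA (r :: rs) (g + 1) i = pvA rs g i := rfl

lemma pv_dead_zero (m : List (List Int)) (i : Nat) : pvDead m 0 i = false := by
  simp [pvDead]

lemma pv_dead_succ_shift (r : List Int) (rs : List (List Int)) (f i : Nat) :
    pvDead (r :: rs) (f + 1) i =
      ((decide (i < r.length) && decide (r.getD i 0 = 0)) || pvDead rs f i) := by
  unfold pvDead
  rw [List.range_succ_eq_map]
  simp only [List.any_cons, List.any_map, Function.comp_def]
  rfl

lemma pv_dead_succ_concat (m : List (List Int)) (f i : Nat) :
    pvDead m (f + 1) i =
      (pvDead m f i || (decide (i < pvLen m f) && decide (pvA m f i = 0))) := by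
  unfold pvDead
  rw [List.range_succ]
  simp

lemma pv_a_out_of_range (m : List (List Int)) (f i : Nat) (h : pvLen m f ≤ i) :
    pvA m f i = 0 := List.getD_eq_default _ _ h

lemma pv_t_out_of_range (m : List (List Int)) (f i : Nat) (h : pvLen m f ≤ i) :
    pvT m f i = 0 := by
  unfold pvT
  rw [pv_a_out_of_range m f i h]
  split <;> rfl

-- ===== B side: solution_alt = double sum of pvT (no Pre_ needed) ==========

def pvColS (j : Nat) : List (List Int) → Int
  | [] => 0
  | r :: rs =>
      if j < r.length then
        (if r.getD j 0 = 0 then 0 else r.getD j 0 + pvColS j rs)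
      else pvColS j rs

lemma pv_foldB_true (j : Nat) (rs : List (List Int)) (t : Int) :
    (rs.foldl (pvStepB j) (t, true)).1 = t := by
  induction rs generalizing t with
  | nil => rfl
  | cons r rs ih => simp only [List.foldl_cons, pvStepB]; split <;> simp [ih]

lemma pv_foldB_false (j : Nat) (rs : List (List Int)) (t : Int) :
    (rs.foldl (pvStepB j) (t, false)).1 = t + pvColS j rs := by
  induction rs generalizing t with
  | nil => simp [pvColS]
  | cons r rs ih =>
    rw [List.foldl_cons]
    by_cases hj : j < r.length
    · have hstep : pvStepB j (t, false) r = (t + r.getD j 0, r.getD j 0 == 0) := by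
        simp [pvStepB, hj]
      rw [hstep]
      by_cases hv : r.getD j 0 = 0
      · have hb : (r.getD j 0 == 0) = true := beq_iff_eq.mpr hv
        rw [hb, pv_foldB_true, pvColS, if_pos hj, if_pos hv, hv, add_zero]
      · have hb : (r.getD j 0 == 0) = false := by
          simpa using hv
        rw [hb, ih, pvColS, if_pos hj, if_neg hv, add_assoc]
    · have hstep : pvStepB j (t, false) r = (t, false) := by
        simp [pvStepB, hj]
      rw [hstep, ih, pvColS, if_neg hj]

lemma pv_colS_eq_sum (j : Nat) (m : List (List Int)) :
    pvColS j m = ∑ f ∈ Finset.range m.length, pvT m f j := by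
  induction m with
  | nil => simp [pvColS]
  | cons r rs ih =>
    have hsplit := Finset.sum_range_succ' (fun f => pvT (r :: rs) f j) rs.length
    have h0 : pvT (r :: rs) 0 j = r.getD j 0 := by
      simp [pvT, pv_dead_zero, pvA]
    rw [List.length_cons, hsplit, h0, pvColS]
    by_cases hj : j < r.length
    · rw [if_pos hj]
      by_cases hv : r.getD j 0 = 0
      · have hz : ∀ f ∈ Finset.range rs.length, pvT (r :: rs) (f + 1) j = 0 := by
          intro f _
          simp only [pvT, pv_dead_succ_shift]
          rw [decide_eq_true hj, decide_eq_true hv]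
          simp
        rw [if_pos hv, Finset.sum_congr rfl hz, Finset.sum_const_zero, zero_add, hv]
      · have hs : ∀ f ∈ Finset.range rs.length, pvT (r :: rs) (f + 1) j = pvT rs f j := by
          intro f _
          simp only [pvT, pv_dead_succ_shift, pv_a_succ]
          rw [decide_eq_false hv]
          simp
        rw [if_neg hv, Finset.sum_congr rfl hs, ← ih, add_comm]
    · rw [if_neg hj]
      have h0' : r.getD j 0 = 0 := List.getD_eq_default _ _ (by omega)
      have hs : ∀ f ∈ Finset.range rs.length, pvT (r :: rs) (f + 1) j = pvT rs f j := by
        intro f _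
        simp only [pvT, pv_dead_succ_shift, pv_a_succ]
        rw [decide_eq_false hj]
        simp
      rw [Finset.sum_congr rfl hs, ← ih, h0', add_zero]

lemma pv_alt_eq_sum (m : List (List Int)) :
    solution_alt m = ∑ j ∈ Finset.range (pvWidth m), ∑ f ∈ Finset.range m.length, pvT m f j := by
  unfold solution_alt
  have hfun : (fun (total : Int) (j : Nat) => (m.foldl (pvStepB j) (total, false)).1)
      = fun total j => total + pvColS j m := by
    funext t j
    exact pv_foldB_false j m t
  rw [hfun, pv_foldl_range_add, zero_add]
  exact Finset.sum_congr rfl fun j _ => pv_colS_eq_sum j m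

-- ===== A side: characterize pvPropA row by row (needs Pre_) ===============

-- elementwise description of the inner zeroing fold
lemma pv_innerA_spec (prev row : List Int) :
    (pvInnerA prev row).length = row.length ∧
    ∀ i, (pvInnerA prev row).getD i 0 =
      if i < row.length ∧ prev.getD i 0 = 0 then 0 else row.getD i 0 := by
  unfold pvInnerA
  suffices main : ∀ L, L ≤ row.length →
      ((List.range L).foldl (fun r i => if prev.getD i 0 = 0 then r.set i 0 else r) row).length
        = row.length ∧
      ∀ i, ((List.range L).foldl (fun r i => if prev.getD i 0 = 0 then r.set i 0 else r)
              row).getD i 0 =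
        if i < L ∧ prev.getD i 0 = 0 then 0 else row.getD i 0 from main row.length le_rfl
  intro L
  induction L with
  | zero =>
    intro _
    rw [List.range_zero, List.foldl_nil]
    exact ⟨rfl, fun i => by rw [if_neg (by omega)]⟩
  | succ n ih =>
    intro hL
    obtain ⟨ihlen, ihget⟩ := ih (by omega)
    simp only [List.range_succ, List.foldl_append, List.foldl_cons, List.foldl_nil]
    set q := (List.range n).foldl (fun r i => if prev.getD i 0 = 0 then r.set i 0 else r) row
      with hq
    by_cases hp : prev.getD n 0 = 0
    · rw [if_pos hp]
      refine ⟨by rw [List.length_set, ihlen], ?_⟩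
      intro i
      by_cases hin : i = n
      · subst hin
        rw [List.getD_eq_getElem?_getD, List.getElem?_set, if_pos rfl,
          if_pos (by rw [ihlen]; omega), Option.getD_some, if_pos ⟨by omega, hp⟩]
      · rw [List.getD_eq_getElem?_getD, List.getElem?_set, if_neg (fun h => hin h.symm),
          ← List.getD_eq_getElem?_getD, ihget]
        by_cases hi : i < n ∧ prev.getD i 0 = 0
        · rw [if_pos hi, if_pos ⟨by omega, hi.2⟩]
        · have hni : ¬ (i < n + 1 ∧ prev.getD i 0 = 0) := by
            rintro ⟨h1, h2⟩
            exact hi ⟨by omega, h2⟩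
          rw [if_neg hi, if_neg hni]
    · rw [if_neg hp]
      refine ⟨ihlen, ?_⟩
      intro i
      rw [ihget]
      by_cases hi : i < n ∧ prev.getD i 0 = 0
      · rw [if_pos hi, if_pos ⟨by omega, hi.2⟩]
      · have hni : ¬ (i < n + 1 ∧ prev.getD i 0 = 0) := by
          rintro ⟨h1, h2⟩
          rcases Nat.lt_succ_iff_lt_or_eq.mp h1 with h | h
          · exact hi ⟨h, h2⟩
          · subst h; exact hp h2
        rw [if_neg hi, if_neg hni]

lemma pv_fr_len (m : List (List Int)) (f : Nat) : (pvFr m f).length = pvLen m f := by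
  simp [pvFr]

lemma pv_fr_getD (m : List (List Int)) (f i : Nat) (hi : i < pvLen m f) :
    (pvFr m f).getD i 0 = pvT m f i := by
  unfold pvFr
  rw [List.getD_eq_getElem _ _ (by simpa using hi)]
  simp

lemma pv_fr_zero (m : List (List Int)) : pvFr m 0 = m.getD 0 [] := by
  unfold pvFr
  have : ∀ i, pvT m 0 i = (m.getD 0 []).getD i 0 := by
    intro i; simp [pvT, pv_dead_zero, pvA]
  calc (List.range (pvLen m 0)).map (fun i => pvT m 0 i)
      = (List.range (pvLen m 0)).map (fun i => (m.getD 0 []).getD i 0) := by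
        exact List.map_congr_left fun i _ => this i
    _ = m.getD 0 [] := pv_map_range_getD _ _

-- the key step: zeroing row k+1 against the FINAL row k gives the final row k+1
lemma pv_innerA_fr (m : List (List Int)) (k : Nat)
    (hle : pvLen m (k + 1) ≤ pvLen m k) :
    pvInnerA (pvFr m k) (m.getD (k + 1) []) = pvFr m (k + 1) := by
  obtain ⟨hlen, hget⟩ := pv_innerA_spec (pvFr m k) (m.getD (k + 1) [])
  apply List.ext_getElem
  · rw [hlen, pv_fr_len]; rfl
  · intro i h1 h2
    have hi : i < pvLen m (k + 1) := by
      have := pv_fr_len m (k + 1); omega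
    rw [← List.getD_eq_getElem _ 0 h1, ← List.getD_eq_getElem _ 0 h2, hget,
      pv_fr_getD m (k + 1) i hi]
    have hik : i < pvLen m k := lt_of_lt_of_le hi hle
    rw [pv_fr_getD m k i hik]
    have hTzero : (pvT m k i = 0) ↔ (pvDead m (k + 1) i = true) := by
      rw [pv_dead_succ_concat]
      unfold pvT
      by_cases hd : pvDead m k i
      · simp [hd]
      · simp [hd, hik]
    by_cases hd : pvDead m (k + 1) i = true
    · have hr : pvT m (k + 1) i = 0 := by
        unfold pvT; rw [if_pos hd]
      rw [hr, if_pos ⟨hi, hTzero.mpr hd⟩]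
    · have hr : pvT m (k + 1) i = pvA m (k + 1) i := by
        unfold pvT; rw [if_neg hd]
      rw [hr, if_neg (fun h => hd (hTzero.mp h.2))]
      rfl

-- the matrix state after the first k propagation steps
def pvM (m : List (List Int)) (k : Nat) : List (List Int) :=
  (List.range m.length).map (fun g => if g ≤ k then pvFr m g else m.getD g [])

lemma pvM_getD (m : List (List Int)) (k g : Nat) (hg : g < m.length) :
    (pvM m k).getD g [] = if g ≤ k then pvFr m g else m.getD g [] := by
  unfold pvM
  rw [List.getD_eq_getElem _ _ (by simpa using hg)]
  simp

lemma pvM_zero (m : List (List Int)) : pvM m 0 = m := by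
  unfold pvM
  have : ∀ g, (if g ≤ 0 then pvFr m g else m.getD g []) = m.getD g [] := by
    intro g
    rcases Nat.eq_zero_or_pos g with h | h
    · subst h; simp [pv_fr_zero]
    · rw [if_neg (by omega)]
  calc (List.range m.length).map (fun g => if g ≤ 0 then pvFr m g else m.getD g [])
      = (List.range m.length).map (fun g => m.getD g []) :=
        List.map_congr_left fun g _ => this g
    _ = m := pv_map_range_getD _ _

lemma pvM_set (m : List (List Int)) (k : Nat) (_hk : k + 1 < m.length) :
    (pvM m k).set (k + 1) (pvFr m (k + 1)) = pvM m (k + 1) := by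
  apply List.ext_getElem
  · simp [pvM]
  · intro g h1 h2
    have hg : g < m.length := by simpa [pvM] using h2
    rw [List.getElem_set]
    by_cases he : k + 1 = g
    · subst he
      rw [if_pos rfl]
      unfold pvM
      simp
    · rw [if_neg he]
      unfold pvM
      simp only [List.getElem_map, List.getElem_range]
      by_cases hgk : g ≤ k
      · rw [if_pos hgk, if_pos (by omega)]
      · rw [if_neg hgk, if_neg (by omega)]

lemma pv_fold_prop (m : List (List Int)) (hpre : Pre_solution m) (k : Nat)
    (hk : k ≤ m.length - 1) :
    (List.range' 1 k).foldl
      (fun mat f => mat.set f (pvInnerA (mat.getD (f - 1) []) (mat.getD f []))) m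
      = pvM m k := by
  induction k with
  | zero => simpa using (pvM_zero m).symm
  | succ n ih =>
    have hn1 : n + 1 < m.length := by omega
    rw [List.range'_concat, List.foldl_append, ih (by omega)]
    simp only [List.foldl_cons, List.foldl_nil]
    have h1 : 1 + 1 * n = n + 1 := by omega
    rw [h1]
    have hprev : (pvM m n).getD (n + 1 - 1) [] = pvFr m n := by
      have : n + 1 - 1 = n := by omega
      rw [this, pvM_getD m n n (by omega), if_pos le_rfl]
    have hcur : (pvM m n).getD (n + 1) [] = m.getD (n + 1) [] := by
      rw [pvM_getD m n (n + 1) hn1, if_neg (by omega)]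
    rw [hprev, hcur,
      pv_innerA_fr m n (hpre n (by omega)),
      pvM_set m n hn1]

lemma pv_propA_eq (m : List (List Int)) (hpre : Pre_solution m) :
    pvPropA m = (List.range m.length).map (fun g => pvFr m g) := by
  unfold pvPropA
  by_cases h : m.length > 1
  · rw [if_pos h, pv_fold_prop m hpre (m.length - 1) le_rfl]
    unfold pvM
    apply List.map_congr_left
    intro g hg
    rw [if_pos (by simp at hg; omega)]
  · rw [if_neg h]
    have hm : ∀ g ∈ List.range m.length, m.getD g [] = pvFr m g := by
      intro g hg
      simp only [List.mem_range] at hg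
      have hg0 : g = 0 := by omega
      subst hg0
      exact (pv_fr_zero m).symm
    calc m = (List.range m.length).map (fun g => m.getD g []) := (pv_map_range_getD m []).symm
      _ = (List.range m.length).map (fun g => pvFr m g) := List.map_congr_left hm

lemma pv_sumAll (ms : List (List Int)) (c : Int) :
    ms.foldl (fun s r => r.foldl (fun s x => s + x) s) c = c + (ms.map List.sum).sum := by
  induction ms generalizing c with
  | nil => simp
  | cons r rs ih =>
    rw [List.foldl_cons, pv_foldl_add r c, ih, List.map_cons, List.sum_cons]
    ring

lemma pv_solution_eq_sum (m : List (List Int)) (hpre : Pre_solution m) :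
    solution m = ∑ f ∈ Finset.range m.length, ∑ i ∈ Finset.range (pvWidth m), pvT m f i := by
  unfold solution
  rw [pv_propA_eq m hpre, pv_sumAll, zero_add, List.map_map]
  simp only [Function.comp_def]
  rw [pv_sum_map_range (fun g => (pvFr m g).sum) m.length]
  apply Finset.sum_congr rfl
  intro f hf
  have hfn : f < m.length := Finset.mem_range.mp hf
  rw [pv_list_sum_eq, pv_fr_len]
  rw [Finset.sum_congr rfl (fun i hi => pv_fr_getD m f i (Finset.mem_range.mp hi))]
  exact Finset.sum_subset
    (fun x hx => Finset.mem_range.mpr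
      (lt_of_lt_of_le (Finset.mem_range.mp hx) (pv_len_le_width m f hfn)))
    (fun i _ hi => pv_t_out_of_range m f i (by simpa using hi))

-- ===== VERDICT (by name: the statement is the Claim_ definition above) =====
theorem solution_spec : Claim_equal_solution := by
  intro m _ hpre
  unfold Spec_solution
  rw [pv_solution_eq_sum m hpre, pv_alt_eq_sum m]
  exact Finset.sum_comm
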